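-- pv_equiv track=rewrite | github.com/louspringer/tidb-agentx-hackathon | broken_python_interpreter.py | estimate_complexity_regex
-- ===== SOURCE A (Python) =====
-- from typing import Dict, List, Any, Optional, Tuple
--
-- def estimate_complexity_regex(content: str) -> Dict[str, int]:
--     """Estimate complexity using regex"""
--     complexity = {'cyclomatic': 0, 'cognitive': 0}
--     lines = content.split('\n')
--
--     for line in lines:
--         line = line.strip()
--         if line.startswith(('if ', 'for ', 'while ', 'except')):
--             complexity['cyclomatic'] += 1
--         if line.startswith(('if ', 'for ', 'while ', 'try', 'with')):
--             complexity['cognitive'] += 1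
--
--     return complexity
-- ===== SOURCE B (Python) =====
-- WS = ' \t\r\x0b\x0c'  # line-local whitespace (newline handled by the scanner itself)
-- KW = ('if ', 'for ', 'while ')
--
-- def estimate_complexity_regex(content):
--     """Single streaming scan over the raw string: per line, skip leading blanks by
--     index, classify by direct prefix checks (with a lookahead for non-blank content
--     replacing the trailing strip), then jump to the next newline. No split/strip."""
--     cyc = cog = 0
--     i, n = 0, len(content)
--     while True:
--         j = i
--         while j < n and content[j] in WS:
--             j += 1
--         e = i
--         while e < n and content[e] != '\n':
--             e += 1
--         matched = False
--         for w in KW: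
--             if content[j:j + len(w)] == w and any(c not in WS for c in content[j + len(w):e]):
--                 cyc += 1
--                 cog += 1
--                 matched = True
--                 break
--         if not matched:
--             if content[j:j + 6] == 'except':
--                 cyc += 1
--             elif content[j:j + 3] == 'try' or content[j:j + 4] == 'with':
--                 cog += 1
--         if e == n:
--             break
--         i = e + 1
--     return {'cyclomatic': cyc, 'cognitive': cog}
-- ===== Notes on version B (the rewrite author's own statement) =====
-- stated objective: alternative
-- what changed: A splits the content into lines and strips each line before two startswith tests on a dict; B is a single streaming index scanner over the raw string that never splits or strips: per line it skips leading blanks by index, classifies by direct slice-prefix checks with a lookahead for non-blank content (replacing the trailing strip), and jumps to the next newline.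
import Mathlib
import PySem

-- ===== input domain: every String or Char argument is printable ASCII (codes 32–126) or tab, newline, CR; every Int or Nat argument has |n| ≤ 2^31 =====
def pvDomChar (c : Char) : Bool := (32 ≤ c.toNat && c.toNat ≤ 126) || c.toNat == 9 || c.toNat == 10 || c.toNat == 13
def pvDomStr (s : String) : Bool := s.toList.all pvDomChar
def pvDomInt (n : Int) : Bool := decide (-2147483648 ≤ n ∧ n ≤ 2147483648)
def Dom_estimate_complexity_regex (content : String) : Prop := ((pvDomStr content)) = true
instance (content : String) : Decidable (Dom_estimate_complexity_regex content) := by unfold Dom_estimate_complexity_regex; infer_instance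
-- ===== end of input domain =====

-- B replaces A's split-into-lines + per-line strip + startswith-on-a-dict by a single streaming index
-- scanner over the raw string (skip leading blanks, direct prefix checks with a lookahead for non-blank
-- content instead of the trailing strip, jump to the next newline); objective: alternative, same cost.

-- ===== PORT A =====
def estimate_complexity_regex (content : String) : List (String × Int) :=
  let complexity : PySem.Dict String Int := PySem.Dict.ofList [("cyclomatic", 0), ("cognitive", 0)]
  let lines := (PySem.Str.split? content "\n").getD []
  let complexity := lines.foldl (fun d line =>
    let line := PySem.Str.strip line
    let d := if PySem.Str.startswith line "if " || PySem.Str.startswith line "for " ||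
                PySem.Str.startswith line "while " || PySem.Str.startswith line "except" then
               d.modify "cyclomatic" 0 (· + 1) else d
    if PySem.Str.startswith line "if " || PySem.Str.startswith line "for " ||
       PySem.Str.startswith line "while " || PySem.Str.startswith line "try" ||
       PySem.Str.startswith line "with" then
      d.modify "cognitive" 0 (· + 1) else d) complexity
  complexity.items

-- ===== PORT B =====
-- Source B's WS = ' \t\r\x0b\x0c' membership test
def pvWS (c : Char) : Bool := c == ' ' || c == '\t' || c == '\r' || c == '\x0b' || c == '\x0c'

-- Source B's 'any(c not in WS for c in content[j+len(w):e])': the scan below keeps the rest of the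
-- content instead of slicing to e, so the lookahead stops at the line's '\n' itself (e is the
-- index of that '\n' or the end of the string) — exact for the slice bounded by e.
def pvHasContent : List Char → Bool
  | [] => false
  | c :: cs => if c == '\n' then false else if pvWS c then pvHasContent cs else true

-- Source B's 'for w in KW: … break' loop; a slice comparison content[j:j+len(w)] == w is a prefix
-- test on the suffix starting at j (exact: the slice clamps at the end of the string)
def pvBranch (s : List Char) : Bool :=
  ("if ".toList.isPrefixOf s && pvHasContent (s.drop 3)) ||
  ("for ".toList.isPrefixOf s && pvHasContent (s.drop 4)) ||
  ("while ".toList.isPrefixOf s && pvHasContent (s.drop 6))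

-- the per-line increments of Source B's loop body (cyc, cog)
def pvLineDelta (s : List Char) : Int × Int :=
  if pvBranch s then (1, 1)
  else if "except".toList.isPrefixOf s then (1, 0)
  else if "try".toList.isPrefixOf s || "with".toList.isPrefixOf s then (0, 1)
  else (0, 0)

-- Source B's outer while loop: s = suffix at j (leading blanks of the line skipped); the match on
-- dropWhile (≠ '\n') is 'if e == n: break / i = e + 1'. Fuel = length + 1 bounds the iterations
-- exactly as the loop is bounded by the string length.
def pvScanGo : Nat → List Char → Int × Int
  | 0, _ => (0, 0)
  | fuel + 1, cs =>
    let s := cs.dropWhile pvWS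
    let d := pvLineDelta s
    match cs.dropWhile (fun c => !(c == '\n')) with
    | [] => d
    | _ :: tl =>
      let p := pvScanGo fuel tl
      (d.1 + p.1, d.2 + p.2)

def estimate_complexity_regex_alt (content : String) : List (String × Int) :=
  let r := pvScanGo (content.toList.length + 1) content.toList
  [("cyclomatic", r.1), ("cognitive", r.2)]

-- ===== PRECONDITION & SPEC =====
def Spec_estimate_complexity_regex (content : String) (out : List (String × Int)) : Prop := out = estimate_complexity_regex_alt content
instance (content : String) (out : List (String × Int)) : Decidable (Spec_estimate_complexity_regex content out) := by unfold Spec_estimate_complexity_regex; infer_instance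

-- ===== CLAIM (what is proved, stated in full; the proofs are below) =====
def Claim_equal_estimate_complexity_regex : Prop := ∀ (content : String), Dom_estimate_complexity_regex content → Spec_estimate_complexity_regex content (estimate_complexity_regex content)

-- ===== LEMMAS AND PROOFS =====

theorem pvCharNatInj (a b : Char) (h : a.toNat = b.toNat) : a = b := by
  apply Char.ext; unfold Char.toNat at h; exact UInt32.toNat_inj.mp h

theorem pvBeqToNat (c d : Char) : (c == d) = decide (c.toNat = d.toNat) := by
  by_cases h : c = d
  · rw [h]; simp
  · have : c.toNat ≠ d.toNat := fun hn => h (pvCharNatInj c d hn)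
    simp [h, this]

/-- On domain characters other than `'\n'`, Python's `str.strip` whitespace is exactly Source B's WS set. -/
theorem pv_isspace_eq (c : Char) (h1 : pvDomChar c = true) (h2 : c ≠ '\n') :
    PySem.Chars.isspace c = pvWS c := by
  have h2' : c.toNat ≠ 10 := fun h => h2 (pvCharNatInj c '\n' h)
  simp only [pvDomChar, Bool.or_eq_true, Bool.and_eq_true, decide_eq_true_eq, beq_iff_eq] at h1
  simp only [PySem.Chars.isspace, pvWS, pvBeqToNat]
  simp only [show (' ').toNat = 32 from rfl, show ('\t').toNat = 9 from rfl,
    show ('\r').toNat = 13 from rfl, show ('\x0b').toNat = 11 from rfl,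
    show ('\x0c').toNat = 12 from rfl]
  apply Bool.eq_iff_iff.mpr
  simp only [Bool.or_eq_true, Bool.and_eq_true, decide_eq_true_eq]
  omega

/-- Count (as an Int) of the lines satisfying `p` (String level, A's side). -/
def pvCnt (p : String → Bool) : List String → Int
  | [] => 0
  | l :: ls => (if p l then 1 else 0) + pvCnt p ls

/-- Count (as an Int) of the char-lists satisfying `p`. -/
def pvCntC (p : List Char → Bool) : List (List Char) → Int
  | [] => 0
  | l :: ls => (if p l then 1 else 0) + pvCntC p ls

def pvCycB (line : String) : Bool :=
  PySem.Str.startswith (PySem.Str.strip line) "if " || PySem.Str.startswith (PySem.Str.strip line) "for " ||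
    PySem.Str.startswith (PySem.Str.strip line) "while " || PySem.Str.startswith (PySem.Str.strip line) "except"

def pvCogB (line : String) : Bool :=
  PySem.Str.startswith (PySem.Str.strip line) "if " || PySem.Str.startswith (PySem.Str.strip line) "for " ||
    PySem.Str.startswith (PySem.Str.strip line) "while " || PySem.Str.startswith (PySem.Str.strip line) "try" ||
    PySem.Str.startswith (PySem.Str.strip line) "with"

def pvCycC (l : List Char) : Bool :=
  PySem.Chars.startswith (PySem.Chars.strip l) "if ".toList ||
    PySem.Chars.startswith (PySem.Chars.strip l) "for ".toList ||
    PySem.Chars.startswith (PySem.Chars.strip l) "while ".toList ||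
    PySem.Chars.startswith (PySem.Chars.strip l) "except".toList

def pvCogC (l : List Char) : Bool :=
  PySem.Chars.startswith (PySem.Chars.strip l) "if ".toList ||
    PySem.Chars.startswith (PySem.Chars.strip l) "for ".toList ||
    PySem.Chars.startswith (PySem.Chars.strip l) "while ".toList ||
    PySem.Chars.startswith (PySem.Chars.strip l) "try".toList ||
    PySem.Chars.startswith (PySem.Chars.strip l) "with".toList

lemma pv_cycB_ofList (l : List Char) : pvCycB (String.ofList l) = pvCycC l := by
  simp [pvCycB, pvCycC]

lemma pv_cogB_ofList (l : List Char) : pvCogB (String.ofList l) = pvCogC l := by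
  simp [pvCogB, pvCogC]

lemma pv_cnt_map_ofList (p : String → Bool) (q : List Char → Bool)
    (h : ∀ l, p (String.ofList l) = q l) (ps : List (List Char)) :
    pvCnt p (ps.map String.ofList) = pvCntC q ps := by
  induction ps with
  | nil => rfl
  | cons l ls ih => simp [pvCnt, pvCntC, h l, ih]

lemma pv_dict_mod_cyc (c g : Int) :
    (PySem.Dict.mk [("cyclomatic", c), ("cognitive", g)]).modify "cyclomatic" 0 (· + 1) =
      PySem.Dict.mk [("cyclomatic", c + 1), ("cognitive", g)] := by
  simp [PySem.Dict.modify, PySem.Dict.insert, PySem.Dict.getD, PySem.Dict.get?, PySem.Dict.contains]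

lemma pv_dict_mod_cog (c g : Int) :
    (PySem.Dict.mk [("cyclomatic", c), ("cognitive", g)]).modify "cognitive" 0 (· + 1) =
      PySem.Dict.mk [("cyclomatic", c), ("cognitive", g + 1)] := by
  simp [PySem.Dict.modify, PySem.Dict.insert, PySem.Dict.getD, PySem.Dict.get?, PySem.Dict.contains]

lemma pv_foldA (lines : List String) (c g : Int) :
    lines.foldl (fun d line =>
      let line := PySem.Str.strip line
      let d := if PySem.Str.startswith line "if " || PySem.Str.startswith line "for " ||
                  PySem.Str.startswith line "while " || PySem.Str.startswith line "except" then
                 d.modify "cyclomatic" 0 (· + 1) else d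
      if PySem.Str.startswith line "if " || PySem.Str.startswith line "for " ||
         PySem.Str.startswith line "while " || PySem.Str.startswith line "try" ||
         PySem.Str.startswith line "with" then
        d.modify "cognitive" 0 (· + 1) else d)
      (PySem.Dict.mk [("cyclomatic", c), ("cognitive", g)]) =
    PySem.Dict.mk [("cyclomatic", c + pvCnt pvCycB lines), ("cognitive", g + pvCnt pvCogB lines)] := by
  induction lines generalizing c g with
  | nil => simp [pvCnt]
  | cons l ls ih =>
    rw [List.foldl_cons]
    by_cases h1 : (PySem.Str.startswith (PySem.Str.strip l) "if " ||
        PySem.Str.startswith (PySem.Str.strip l) "for " ||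
        PySem.Str.startswith (PySem.Str.strip l) "while " ||
        PySem.Str.startswith (PySem.Str.strip l) "except") = true <;>
      by_cases h2 : (PySem.Str.startswith (PySem.Str.strip l) "if " ||
        PySem.Str.startswith (PySem.Str.strip l) "for " ||
        PySem.Str.startswith (PySem.Str.strip l) "while " ||
        PySem.Str.startswith (PySem.Str.strip l) "try" ||
        PySem.Str.startswith (PySem.Str.strip l) "with") = true <;>
      simp only [pvCnt, pvCycB, pvCogB, h1, h2, if_true, if_false, Bool.false_eq_true,
        pv_dict_mod_cyc, pv_dict_mod_cog, ih] <;>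
      simp_all <;> omega

-- ---- the "line" view of a split on '\n' ----

/-- Prepend onto the first piece. -/
def pvHeadPre (p : List Char) : List (List Char) → List (List Char)
  | [] => [p]
  | h :: t => (p ++ h) :: t

/-- `s.split('\n')` as a structural recursion. -/
def splitNL : List Char → List (List Char)
  | [] => [[]]
  | c :: cs => if c = '\n' then [] :: splitNL cs else pvHeadPre [c] (splitNL cs)

lemma splitNL_ne_nil (cs : List Char) : splitNL cs ≠ [] := by
  cases cs with
  | nil => simp [splitNL]
  | cons c cs =>
    simp only [splitNL]
    split
    · simp
    · cases h : splitNL cs <;> simp [pvHeadPre]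

lemma pvHeadPre_headPre (p q : List Char) (x : List (List Char)) :
    pvHeadPre p (pvHeadPre q x) = pvHeadPre (p ++ q) x := by
  cases x <;> simp [pvHeadPre]

lemma pvHeadPre_nil (x : List (List Char)) (h : x ≠ []) : pvHeadPre [] x = x := by
  cases x with
  | nil => exact absurd rfl h
  | cons a t => simp [pvHeadPre]

lemma pv_go_spec : ∀ (fuel : Nat) (l cur : List Char) (hacc : List (List Char)),
    l.length < fuel →
    PySem.Chars.splitOn.go ['\n'] fuel l cur hacc = hacc.reverse ++ pvHeadPre cur.reverse (splitNL l) := by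
  intro fuel
  induction fuel with
  | zero => intro l cur hacc h; omega
  | succ fuel ih =>
    intro l cur hacc h
    cases l with
    | nil =>
      simp [PySem.Chars.splitOn.go, splitNL, pvHeadPre]
    | cons c rest =>
      by_cases hc : c = '\n'
      · subst hc
        have hpre : (['\n'] : List Char).isPrefixOf ('\n' :: rest) = true := by simp
        simp only [PySem.Chars.splitOn.go, hpre, if_true,
          show (['\n'] : List Char).length = 1 from rfl, List.drop_succ_cons, List.drop_zero]
        rw [ih rest [] (cur.reverse :: hacc) (by simpa using Nat.lt_of_succ_lt_succ h)]
        cases hx : splitNL rest with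
        | nil => exact absurd hx (splitNL_ne_nil rest)
        | cons a t => simp [splitNL, pvHeadPre, hx]
      · have hpre : (['\n'] : List Char).isPrefixOf (c :: rest) = false := by
          cases hx : (['\n'] : List Char).isPrefixOf (c :: rest)
          · rfl
          · exfalso
            have := List.isPrefixOf_iff_prefix.mp hx
            rw [List.cons_prefix_cons] at this
            exact hc this.1.symm
        simp only [PySem.Chars.splitOn.go, hpre, Bool.false_eq_true, if_false]
        rw [ih rest (c :: cur) hacc (by simpa using Nat.lt_of_succ_lt_succ h)]
        simp [splitNL, hc, List.reverse_cons, ← pvHeadPre_headPre]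

lemma pv_splitOn_eq (cs : List Char) : PySem.Chars.splitOn cs ['\n'] = splitNL cs := by
  unfold PySem.Chars.splitOn
  rw [pv_go_spec (cs.length + 1) cs [] [] (by omega)]
  simp [pvHeadPre_nil _ (splitNL_ne_nil cs)]

lemma pv_splitNL_append (l t : List Char) (hl : ∀ c ∈ l, c ≠ '\n') :
    splitNL (l ++ t) = pvHeadPre l (splitNL t) := by
  induction l with
  | nil => simp [pvHeadPre_nil _ (splitNL_ne_nil t)]
  | cons c l ih =>
    have hc : c ≠ '\n' := hl c (by simp)
    simp only [List.cons_append, splitNL, hc, if_false]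
    rw [ih (fun x hx => hl x (by simp [hx]))]
    rw [pvHeadPre_headPre]
    rfl

lemma pv_dropWhile_nl_shape (cs : List Char) :
    cs.dropWhile (fun c => !(c == '\n')) = [] ∨
      ∃ r, cs.dropWhile (fun c => !(c == '\n')) = '\n' :: r := by
  induction cs with
  | nil => left; rfl
  | cons c cs ih =>
    by_cases hc : c = '\n'
    · right; exact ⟨cs, by simp [List.dropWhile, hc]⟩
    · have hstep : (c :: cs).dropWhile (fun c => !(c == '\n')) =
          cs.dropWhile (fun c => !(c == '\n')) := by
        rw [List.dropWhile_cons_of_pos]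
        simp [hc]
      rw [hstep]; exact ih

-- ---- strip / prefix facts ----

lemma pv_rstrip_cons (c : Char) (s : List Char) :
    PySem.Chars.rstrip (c :: s) =
      if PySem.Chars.rstrip s = [] then (if PySem.Chars.isspace c then [] else [c])
      else c :: PySem.Chars.rstrip s := by
  simp only [PySem.Chars.rstrip, List.reverse_cons, List.dropWhile_append]
  by_cases h : List.dropWhile PySem.Chars.isspace s.reverse = []
  · simp only [h, List.isEmpty_nil, if_true, List.reverse_eq_nil_iff, List.dropWhile]
    cases hc : PySem.Chars.isspace c <;> simp
  · have h' : (List.dropWhile PySem.Chars.isspace s.reverse).isEmpty = false := by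
      simpa [List.isEmpty_iff] using h
    have h'' : ¬ (List.dropWhile PySem.Chars.isspace s.reverse).reverse = [] := by
      simpa [List.reverse_eq_nil_iff] using h
    simp [h', h'']

lemma pv_rstrip_eq_nil_iff (s : List Char) :
    PySem.Chars.rstrip s = [] ↔ ∀ c ∈ s, PySem.Chars.isspace c = true := by
  simp [PySem.Chars.rstrip, List.reverse_eq_nil_iff, List.dropWhile_eq_nil_iff]

lemma pv_prefix_all_ws {p s : List Char} (h : p <+: s)
    (hs : ∀ c ∈ s, PySem.Chars.isspace c = true) : ∀ c ∈ p, PySem.Chars.isspace c = true :=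
  fun c hc => hs c (h.sublist.subset hc)

/-- A keyword ending in a non-space character survives the right strip. -/
lemma pv_rstrip_prefix_nonws (q : List Char) (a : Char) (ha : PySem.Chars.isspace a = false) :
    ∀ s : List Char, (q ++ [a]).isPrefixOf (PySem.Chars.rstrip s) = (q ++ [a]).isPrefixOf s := by
  intro s
  induction s generalizing q with
  | nil => simp [PySem.Chars.rstrip]
  | cons c s ih =>
    rw [pv_rstrip_cons]
    by_cases h : PySem.Chars.rstrip s = []
    · have hws : ∀ x ∈ s, PySem.Chars.isspace x = true := (pv_rstrip_eq_nil_iff s).mp h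
      rw [h, if_pos rfl]
      by_cases hc : PySem.Chars.isspace c = true
      · -- rstrip (c :: s) = []
        rw [if_pos hc]
        apply Bool.eq_iff_iff.mpr
        simp only [List.isPrefixOf_iff_prefix, List.prefix_nil]
        constructor
        · intro hx; exact absurd hx (by simp)
        · intro hx
          exfalso
          have hall : ∀ x ∈ c :: s, PySem.Chars.isspace x = true := by
            intro x hx'
            rcases List.mem_cons.mp hx' with rfl | hx'
            · exact hc
            · exact hws x hx'
          have := pv_prefix_all_ws hx hall a (by simp)
          simp [this] at ha
      · -- rstrip (c :: s) = [c]
        rw [if_neg hc]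
        apply Bool.eq_iff_iff.mpr
        simp only [List.isPrefixOf_iff_prefix]
        cases q with
        | nil => simp [List.cons_prefix_cons]
        | cons b q' =>
          simp only [List.cons_append, List.cons_prefix_cons]
          constructor
          · rintro ⟨rfl, h2⟩
            exact ⟨rfl, by simpa using (List.prefix_nil.mp h2)⟩
          · rintro ⟨rfl, h2⟩
            exfalso
            have := pv_prefix_all_ws h2 hws a (by simp)
            simp [this] at ha
    · rw [if_neg h]
      cases q with
      | nil => simp [List.isPrefixOf]
      | cons b q' =>
        simp only [List.cons_append, List.isPrefixOf, ih q']

/-- A keyword ending in a space survives the right strip iff non-space content follows. -/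
lemma pv_rstrip_prefix_ws (q : List Char) (a : Char) (ha : PySem.Chars.isspace a = true) :
    ∀ s : List Char, (q ++ [a]).isPrefixOf (PySem.Chars.rstrip s) =
      ((q ++ [a]).isPrefixOf s && (s.drop (q.length + 1)).any (fun c => !PySem.Chars.isspace c)) := by
  intro s
  induction s generalizing q with
  | nil => simp [PySem.Chars.rstrip]
  | cons c s ih =>
    rw [pv_rstrip_cons]
    by_cases h : PySem.Chars.rstrip s = []
    · have hws : ∀ x ∈ s, PySem.Chars.isspace x = true := (pv_rstrip_eq_nil_iff s).mp h
      have hany : s.any (fun c => !PySem.Chars.isspace c) = false := by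
        simp only [List.any_eq_false]
        intro x hx; simp [hws x hx]
      have hanyd : ∀ k, (s.drop k).any (fun c => !PySem.Chars.isspace c) = false := by
        intro k
        simp only [List.any_eq_false]
        intro x hx; simp [hws x (List.mem_of_mem_drop hx)]
      rw [h, if_pos rfl]
      cases q with
      | nil =>
        simp only [List.nil_append, List.length_nil, Nat.zero_add, List.drop_succ_cons,
          List.drop_zero, hany, Bool.and_false]
        by_cases hc : PySem.Chars.isspace c = true
        · rw [if_pos hc]
          simp [List.isPrefixOf]
        · rw [if_neg hc]
          apply Bool.eq_iff_iff.mpr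
          simp only [List.isPrefixOf_iff_prefix, List.cons_prefix_cons, List.prefix_nil]
          constructor
          · rintro ⟨h1, -⟩; exact (hc (h1 ▸ ha)).elim
          · intro hx; exact absurd hx (by simp)
      | cons b q' =>
        simp only [List.cons_append, List.length_cons, List.drop_succ_cons, hanyd, Bool.and_false]
        by_cases hc : PySem.Chars.isspace c = true
        · rw [if_pos hc]
          simp [List.isPrefixOf]
        · rw [if_neg hc]
          apply Bool.eq_iff_iff.mpr
          simp only [List.isPrefixOf_iff_prefix, List.cons_prefix_cons, List.prefix_nil]
          constructor
          · rintro ⟨rfl, h2⟩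
            have : (q' ++ [a]) = [] := h2
            simp at this
          · intro hx; exact absurd hx (by simp)
    · have hany : s.any (fun c => !PySem.Chars.isspace c) = true := by
        by_contra hx
        rw [Bool.not_eq_true, List.any_eq_false] at hx
        exact h ((pv_rstrip_eq_nil_iff s).mpr (fun x hxx => by simpa using hx x hxx))
      rw [if_neg h]
      cases q with
      | nil =>
        simp only [List.nil_append, List.length_nil, Nat.zero_add, List.drop_succ_cons,
          List.drop_zero, hany, Bool.and_true]
        simp [List.isPrefixOf]
      | cons b q' =>
        simp only [List.cons_append, List.length_cons, List.drop_succ_cons, List.isPrefixOf,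
          ih q', Bool.and_assoc]

lemma pv_dropWhile_ws_eq (l : List Char) (h : ∀ c ∈ l, pvDomChar c = true ∧ c ≠ '\n') :
    List.dropWhile PySem.Chars.isspace l = l.dropWhile pvWS := by
  induction l with
  | nil => rfl
  | cons c l ih =>
    have hc := h c (by simp)
    simp only [List.dropWhile, pv_isspace_eq c hc.1 hc.2]
    cases pvWS c
    · rfl
    · exact ih (fun x hx => h x (by simp [hx]))

lemma pv_hasContent_eq (a tail : List Char) (ha : ∀ c ∈ a, pvDomChar c = true ∧ c ≠ '\n')
    (ht : tail = [] ∨ ∃ r, tail = '\n' :: r) :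
    pvHasContent (a ++ tail) = a.any (fun c => !PySem.Chars.isspace c) := by
  induction a with
  | nil =>
    rcases ht with rfl | ⟨r, rfl⟩ <;> simp [pvHasContent]
  | cons c a ih =>
    have hc := ha c (by simp)
    have hcn : (c == '\n') = false := by simp [hc.2]
    simp only [List.cons_append, pvHasContent, hcn, Bool.false_eq_true, if_false, List.any_cons]
    rw [← pv_isspace_eq c hc.1 hc.2]
    cases hs : PySem.Chars.isspace c
    · simp
    · simpa using ih (fun x hx => ha x (by simp [hx]))

lemma pv_prefix_append_nl (kw a tail : List Char) (hk : '\n' ∉ kw)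
    (ht : tail = [] ∨ ∃ r, tail = '\n' :: r) :
    kw.isPrefixOf (a ++ tail) = kw.isPrefixOf a := by
  apply Bool.eq_iff_iff.mpr
  simp only [List.isPrefixOf_iff_prefix]
  constructor
  · intro h
    rcases ht with rfl | ⟨r, rfl⟩
    · simpa using h
    · by_cases hl : kw.length ≤ a.length
      · exact List.prefix_of_prefix_length_le h (List.prefix_append a _) hl
      · exfalso
        have hlt : a.length < kw.length := Nat.lt_of_not_le hl
        have hgl : a.length < (a ++ '\n' :: r).length := by simp
        have he : kw[a.length]'hlt = (a ++ '\n' :: r)[a.length]'hgl := h.getElem hlt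
        rw [List.getElem_append_right (Nat.le_refl _)] at he
        simp at he
        exact hk (he ▸ List.getElem_mem hlt)
  · intro h; exact h.trans (List.prefix_append a tail)

lemma pv_prefix_head {a b : Char} {l1 l2 u : List Char}
    (h1 : (a :: l1) <+: u) (h2 : (b :: l2) <+: u) : a = b := by
  obtain ⟨t1, rfl⟩ := h1
  obtain ⟨t2, h⟩ := h2
  simpa using congrArg List.head? h.symm

/-- The classification table: Source B's first-match branches vs A's two independent tests. -/
lemma pv_delta_table (p1 p2 p3 p4 p5 p6 : Bool)
    (hd : p4 = true → p5 = false ∧ p6 = false) :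
    (if p1 || p2 || p3 then ((1 : Int), (1 : Int))
     else if p4 then (1, 0) else if p5 || p6 then (0, 1) else (0, 0)) =
      ((if p1 || p2 || p3 || p4 then (1 : Int) else 0),
       (if p1 || p2 || p3 || p5 || p6 then (1 : Int) else 0)) := by
  cases p1 <;> cases p2 <;> cases p3 <;> cases p4 <;> cases p5 <;> cases p6 <;> simp_all

/-- Per-line agreement: Source B's classification of the raw suffix equals A's strip + startswith tests. -/
lemma pv_delta_eq (l tail : List Char) (hD : ∀ c ∈ l, pvDomChar c = true)
    (hn : ∀ c ∈ l, c ≠ '\n') (ht : tail = [] ∨ ∃ r, tail = '\n' :: r) :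
    pvLineDelta ((l ++ tail).dropWhile pvWS) =
      ((if pvCycC l then (1 : Int) else 0), (if pvCogC l then (1 : Int) else 0)) := by
  have hDn : ∀ c ∈ l, pvDomChar c = true ∧ c ≠ '\n' := fun c hc => ⟨hD c hc, hn c hc⟩
  have hsplit : (l ++ tail).dropWhile pvWS = l.dropWhile pvWS ++ tail := by
    rw [List.dropWhile_append]
    by_cases h : (List.dropWhile pvWS l).isEmpty = true
    · have h0 : List.dropWhile pvWS l = [] := by simpa [List.isEmpty_iff] using h
      rw [if_pos h, h0, List.nil_append]
      rcases ht with rfl | ⟨r, rfl⟩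
      · rfl
      · simp [List.dropWhile, pvWS]
    · rw [if_neg h]
  set l' := l.dropWhile pvWS with hl'
  have hl'mem : ∀ c ∈ l', pvDomChar c = true ∧ c ≠ '\n' :=
    fun c hc => hDn c ((List.dropWhile_sublist pvWS).subset hc)
  have hstrip : PySem.Chars.strip l = PySem.Chars.rstrip l' := by
    rw [PySem.Chars.strip, PySem.Chars.lstrip, pv_dropWhile_ws_eq l hDn]
  have hkw : ∀ kw : List Char, '\n' ∉ kw → kw.isPrefixOf (l' ++ tail) = kw.isPrefixOf l' :=
    fun kw hk => pv_prefix_append_nl kw l' tail hk ht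
  have hct : ∀ k : Nat, k ≤ l'.length →
      pvHasContent ((l' ++ tail).drop k) = (l'.drop k).any (fun c => !PySem.Chars.isspace c) := by
    intro k hk
    rw [List.drop_append_of_le_length hk]
    exact pv_hasContent_eq (l'.drop k) tail (fun c hc => hl'mem c (List.mem_of_mem_drop hc)) ht
  -- the six prefix tests, both sides expressed on l'
  have e_if : ("if ".toList.isPrefixOf (l' ++ tail) && pvHasContent ((l' ++ tail).drop 3)) =
      PySem.Chars.startswith (PySem.Chars.strip l) "if ".toList := by
    rw [hstrip, show ("if ".toList : List Char) = "if".toList ++ [' '] from rfl,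
      PySem.Chars.startswith, pv_rstrip_prefix_ws "if".toList ' ' (by decide) l',
      hkw _ (by decide)]
    by_cases hp : ("if".toList ++ [' ']).isPrefixOf l' = true
    · have hlen : 3 ≤ l'.length := by
        have := (List.isPrefixOf_iff_prefix.mp hp).length_le
        simpa using this
      rw [hp, hct 3 hlen]
      rfl
    · simp only [Bool.not_eq_true] at hp
      rw [hp]
      simp
  have e_for : ("for ".toList.isPrefixOf (l' ++ tail) && pvHasContent ((l' ++ tail).drop 4)) =
      PySem.Chars.startswith (PySem.Chars.strip l) "for ".toList := by
    rw [hstrip, show ("for ".toList : List Char) = "for".toList ++ [' '] from rfl,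
      PySem.Chars.startswith, pv_rstrip_prefix_ws "for".toList ' ' (by decide) l',
      hkw _ (by decide)]
    by_cases hp : ("for".toList ++ [' ']).isPrefixOf l' = true
    · have hlen : 4 ≤ l'.length := by
        have := (List.isPrefixOf_iff_prefix.mp hp).length_le
        simpa using this
      rw [hp, hct 4 hlen]
      rfl
    · simp only [Bool.not_eq_true] at hp
      rw [hp]
      simp
  have e_while : ("while ".toList.isPrefixOf (l' ++ tail) && pvHasContent ((l' ++ tail).drop 6)) =
      PySem.Chars.startswith (PySem.Chars.strip l) "while ".toList := by
    rw [hstrip, show ("while ".toList : List Char) = "while".toList ++ [' '] from rfl,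
      PySem.Chars.startswith, pv_rstrip_prefix_ws "while".toList ' ' (by decide) l',
      hkw _ (by decide)]
    by_cases hp : ("while".toList ++ [' ']).isPrefixOf l' = true
    · have hlen : 6 ≤ l'.length := by
        have := (List.isPrefixOf_iff_prefix.mp hp).length_le
        simpa using this
      rw [hp, hct 6 hlen]
      rfl
    · simp only [Bool.not_eq_true] at hp
      rw [hp]
      simp
  have e_except : ("except".toList.isPrefixOf (l' ++ tail)) =
      PySem.Chars.startswith (PySem.Chars.strip l) "except".toList := by
    rw [hstrip, show ("except".toList : List Char) = "excep".toList ++ ['t'] from rfl,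
      PySem.Chars.startswith, pv_rstrip_prefix_nonws "excep".toList 't' (by decide) l',
      hkw _ (by decide)]
  have e_try : ("try".toList.isPrefixOf (l' ++ tail)) =
      PySem.Chars.startswith (PySem.Chars.strip l) "try".toList := by
    rw [hstrip, show ("try".toList : List Char) = "tr".toList ++ ['y'] from rfl,
      PySem.Chars.startswith, pv_rstrip_prefix_nonws "tr".toList 'y' (by decide) l',
      hkw _ (by decide)]
  have e_with : ("with".toList.isPrefixOf (l' ++ tail)) =
      PySem.Chars.startswith (PySem.Chars.strip l) "with".toList := by
    rw [hstrip, show ("with".toList : List Char) = "wit".toList ++ ['h'] from rfl,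
      PySem.Chars.startswith, pv_rstrip_prefix_nonws "wit".toList 'h' (by decide) l',
      hkw _ (by decide)]
  -- disjointness: a line starting with 'except' starts with neither 'try' nor 'with'
  have hdisj : "except".toList.isPrefixOf (l' ++ tail) = true →
      "try".toList.isPrefixOf (l' ++ tail) = false ∧ "with".toList.isPrefixOf (l' ++ tail) = false := by
    intro hx
    constructor <;> by_contra hy <;> rw [Bool.not_eq_false, List.isPrefixOf_iff_prefix] at hy <;>
      rw [List.isPrefixOf_iff_prefix] at hx
    · exact absurd (pv_prefix_head hx hy) (by decide)
    · exact absurd (pv_prefix_head hx hy) (by decide)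
  rw [hsplit]
  simp only [pvLineDelta, pvBranch, pvCycC, pvCogC, ← e_if, ← e_for, ← e_while, ← e_except,
    ← e_try, ← e_with]
  exact pv_delta_table _ _ _ _ _ _ hdisj

/-- The streaming scan computes the per-line counts of the line view. -/
lemma pv_scan_eq : ∀ (n : Nat) (cs : List Char), cs.length < n →
    (∀ c ∈ cs, pvDomChar c = true) →
    pvScanGo n cs = (pvCntC pvCycC (splitNL cs), pvCntC pvCogC (splitNL cs)) := by
  intro n
  induction n with
  | zero => intro cs h _; omega
  | succ n ih =>
    intro cs h hD
    have hsplit := List.takeWhile_append_dropWhile (p := fun c => !(c == '\n')) (l := cs)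
    have hlnl : ∀ c ∈ cs.takeWhile (fun c => !(c == '\n')), c ≠ '\n' := by
      intro c hc
      have := List.mem_takeWhile_imp hc
      simpa using this
    have hlD : ∀ c ∈ cs.takeWhile (fun c => !(c == '\n')), pvDomChar c = true :=
      fun c hc => hD c ((List.takeWhile_sublist _).subset hc)
    rcases pv_dropWhile_nl_shape cs with hdrop | ⟨r, hdrop⟩
    · have hcs : cs = cs.takeWhile (fun c => !(c == '\n')) ++ ([] : List Char) := by
        conv_lhs => rw [← hsplit]
        rw [hdrop]
      simp only [pvScanGo, hdrop]
      conv_lhs => rw [hcs]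
      rw [pv_delta_eq _ [] hlD hlnl (Or.inl rfl)]
      conv_rhs => rw [hcs]
      rw [pv_splitNL_append _ [] hlnl]
      simp [splitNL, pvHeadPre, pvCntC]
    · have hcs : cs = cs.takeWhile (fun c => !(c == '\n')) ++ ('\n' :: r) := by
        conv_lhs => rw [← hsplit]
        rw [hdrop]
      have hrlen : r.length < n := by
        have : cs.length = (cs.takeWhile (fun c => !(c == '\n'))).length + 1 + r.length := by
          conv_lhs => rw [hcs]
          simp
          omega
        omega
      have hrD : ∀ c ∈ r, pvDomChar c = true := by
        intro c hc
        exact hD c (by rw [hcs]; simp [hc])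
      simp only [pvScanGo, hdrop]
      rw [ih r hrlen hrD]
      conv_lhs => rw [hcs]
      rw [pv_delta_eq _ ('\n' :: r) hlD hlnl (Or.inr ⟨r, rfl⟩)]
      conv_rhs => rw [hcs]
      rw [pv_splitNL_append _ ('\n' :: r) hlnl]
      simp [splitNL, pvHeadPre, pvCntC]

-- ===== VERDICT (by name: the statement is the Claim_ definition above) =====
theorem estimate_complexity_regex_spec : Claim_equal_estimate_complexity_regex := by
  intro content hdom
  unfold Spec_estimate_complexity_regex estimate_complexity_regex estimate_complexity_regex_alt
  have hD : ∀ c ∈ content.toList, pvDomChar c = true := by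
    intro c hc
    unfold Dom_estimate_complexity_regex pvDomStr at hdom
    exact List.all_eq_true.mp hdom c hc
  have hlines : (PySem.Str.split? content "\n").getD [] = (splitNL content.toList).map String.ofList := by
    simp only [PySem.Str.split?, PySem.Chars.split?,
      show ("\n".toList : List Char) = ['\n'] from rfl]
    simp [pv_splitOn_eq]
  have h0 : PySem.Dict.ofList [("cyclomatic", (0 : Int)), ("cognitive", 0)] =
      PySem.Dict.mk [("cyclomatic", 0), ("cognitive", 0)] := by decide
  simp only [hlines, h0, pv_foldA, zero_add]
  rw [pv_cnt_map_ofList pvCycB pvCycC pv_cycB_ofList, pv_cnt_map_ofList pvCogB pvCogC pv_cogB_ofList]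
  rw [pv_scan_eq (content.toList.length + 1) content.toList (by omega) hD]
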